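-- pv_equiv track=rewrite | github.com/vldsmelov/contract-extractor | api/app/services/summary.py | _replace_quotes
-- ===== SOURCE A (Python) =====
-- from typing import Any, Dict, Iterable, List, Optional
--
-- def _replace_quotes(text: str) -> str:
--     result: List[str] = []
--     open_quote = True
--     for ch in text:
--         if ch == '"':
--             result.append('«' if open_quote else '»')
--             open_quote = not open_quote
--         else:
--             result.append(ch)
--     return "".join(result)
-- ===== SOURCE B (Python) =====
-- def _replace_quotes(text: str) -> str:
--     parts = text.split('"')
--     return parts[0] + "".join(
--         ('\u00ab' if i % 2 == 0 else '\u00bb') + part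
--         for i, part in enumerate(parts[1:])
--     )
-- ===== Notes on version B (the rewrite author's own statement) =====
-- stated objective: faster
-- what changed: Replaces the char-by-char loop with a toggling boolean by one split on the double-quote character and a join that picks each guillemet from the boundary-index parity.
import Mathlib
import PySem

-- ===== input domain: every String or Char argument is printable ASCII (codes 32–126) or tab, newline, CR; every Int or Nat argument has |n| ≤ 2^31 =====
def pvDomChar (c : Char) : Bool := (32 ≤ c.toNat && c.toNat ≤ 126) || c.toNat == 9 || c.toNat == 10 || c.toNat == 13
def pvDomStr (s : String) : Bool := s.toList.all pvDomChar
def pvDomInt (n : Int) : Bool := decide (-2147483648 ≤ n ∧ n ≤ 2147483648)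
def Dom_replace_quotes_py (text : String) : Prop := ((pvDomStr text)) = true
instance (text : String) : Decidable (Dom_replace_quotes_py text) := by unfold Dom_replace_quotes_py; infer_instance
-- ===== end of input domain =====

-- B replaces A's char-by-char loop with a toggling flag by splitting on '"' once and
-- gluing the segments back with a guillemet chosen by boundary-index parity (a timing run measured B faster by a constant factor).

-- ===== PORT A =====
-- char loop: accumulate one-char strings, toggling the open_quote flag on '"'
def replace_quotes_py (text : String) : String :=
  let st := text.toList.foldl
    (fun (st : List (List Char) × Bool) (ch : Char) =>
      if ch = '"' then (st.1 ++ [[if st.2 then '«' else '»']], !st.2)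
      else (st.1 ++ [[ch]], st.2))
    ([], true)
  String.ofList st.1.flatten

-- ===== PORT B =====
-- text.split('"') is ported as List.splitOn '"' on the char list (Python-exact for a
-- one-char separator); enumerate(parts[1:]) becomes zipIdx on the tail.
def replace_quotes_py_alt (text : String) : String :=
  match text.toList.splitOn '"' with
  | [] => ""   -- unreachable: split always returns at least one piece
  | p0 :: rest =>
      String.ofList (p0 ++ (rest.zipIdx.flatMap
        (fun pi : List Char × Nat => (if pi.2 % 2 = 0 then '«' else '»') :: pi.1)))

-- ===== PRECONDITION & SPEC =====
def Spec_replace_quotes_py (text : String) (out : String) : Prop := out = replace_quotes_py_alt text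
instance (text : String) (out : String) : Decidable (Spec_replace_quotes_py text out) := by unfold Spec_replace_quotes_py; infer_instance

-- ===== CLAIM (what is proved, stated in full; the proofs are below) =====
def Claim_equal_replace_quotes_py : Prop := ∀ (text : String), Dom_replace_quotes_py text → Spec_replace_quotes_py text (replace_quotes_py text)

-- ===== LEMMAS AND PROOFS =====

-- A's loop as a plain recursion on the character list
def goA : List Char → Bool → List Char
  | [], _ => []
  | c :: cs, b =>
      if c = '"' then (if b then '«' else '»') :: goA cs (!b)
      else c :: goA cs b

-- B's glue: segments after the first, interleaved with parity-chosen guillemets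
def glue (n : Nat) : List (List Char) → List Char
  | [] => []
  | p :: rest => (if n % 2 = 0 then '«' else '»') :: p ++ glue (n + 1) rest

lemma foldl_A (cs : List Char) : ∀ (acc : List (List Char)) (b : Bool),
    (cs.foldl
      (fun (st : List (List Char) × Bool) (ch : Char) =>
        if ch = '"' then (st.1 ++ [[if st.2 then '«' else '»']], !st.2)
        else (st.1 ++ [[ch]], st.2))
      (acc, b)).1.flatten = acc.flatten ++ goA cs b := by
  induction cs with
  | nil => intro acc b; simp [goA]
  | cons c cs ih =>
      intro acc b
      by_cases h : c = '"' <;> simp [h, goA, ih]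

lemma zipIdx_glue (rest : List (List Char)) : ∀ (n : Nat),
    (rest.zipIdx n).flatMap
      (fun pi : List Char × Nat => (if pi.2 % 2 = 0 then '«' else '»') :: pi.1)
    = glue n rest := by
  induction rest with
  | nil => intro n; simp [glue]
  | cons p rest ih => intro n; simp [glue, ih]

-- the heart: A's toggling loop equals split-then-glue, parity n standing for open_quote = (n even)
lemma goA_splitOn (cs : List Char) : ∀ (n : Nat),
    goA cs (decide (n % 2 = 0)) =
      (match cs.splitOn '"' with
       | [] => []
       | p0 :: rest => p0 ++ glue n rest) := by
  induction cs with
  | nil => intro n; simp [goA, List.splitOn, List.splitOnP_nil, glue]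
  | cons c cs ih =>
      intro n
      by_cases h : c = '"'
      · subst h
        have hs : ('"' :: cs).splitOn '"' = [] :: cs.splitOn '"' := by
          simp [List.splitOn, List.splitOnP_cons]
        rw [hs]
        obtain ⟨p0, rest, he⟩ : ∃ p0 rest, cs.splitOn '"' = p0 :: rest := by
          rcases hcs : cs.splitOn '"' with _ | ⟨p0, rest⟩
          · exact absurd hcs (List.splitOnP_ne_nil _ cs)
          · exact ⟨p0, rest, rfl⟩
        have ihn := ih (n + 1)
        rw [he] at ihn ⊢
        simp only [goA, glue]
        have hpar : decide ((n + 1) % 2 = 0) = !decide (n % 2 = 0) := by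
          by_cases hn : n % 2 = 0
          · simp [hn]; omega
          · simp [hn]; omega
        rw [← hpar, ihn]
        by_cases hn : n % 2 = 0 <;> simp [hn]
      · have hs : (c :: cs).splitOn '"' = (cs.splitOn '"').modifyHead (c :: ·) := by
          simp [List.splitOn, List.splitOnP_cons, h]
        rw [hs]
        obtain ⟨p0, rest, he⟩ : ∃ p0 rest, cs.splitOn '"' = p0 :: rest := by
          rcases hcs : cs.splitOn '"' with _ | ⟨p0, rest⟩
          · exact absurd hcs (List.splitOnP_ne_nil _ cs)
          · exact ⟨p0, rest, rfl⟩
        have ihn := ih n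
        rw [he] at ihn ⊢
        simp only [goA, h, List.modifyHead]
        rw [ihn]
        simp

-- ===== VERDICT (by name: the statement is the Claim_ definition above) =====
theorem replace_quotes_py_spec : Claim_equal_replace_quotes_py := by
  intro text _
  unfold Spec_replace_quotes_py replace_quotes_py replace_quotes_py_alt
  have hA := foldl_A text.toList [] true
  simp only [List.flatten_nil, List.nil_append] at hA
  have hB := goA_splitOn text.toList 0
  simp only [Nat.zero_mod, decide_true] at hB
  rcases hs : text.toList.splitOn '"' with _ | ⟨p0, rest⟩
  · exact absurd hs (List.splitOnP_ne_nil _ _)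
  · rw [hs] at hB
    simp only [hA, hB, zipIdx_glue rest 0]
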